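-- pv_equiv track=rewrite | github.com/clara-gdef/seq2seq | utils/Utils.py | separate_title_from_desc
-- ===== SOURCE A (Python) =====
-- def separate_title_from_desc(sequence, delimiter_token):
--     title = []
--     desc = []
--     flag_end_of_title = False
--     for tok in sequence:
--         if not flag_end_of_title:
--             title.append(tok)
--             if tok == delimiter_token:
--                 flag_end_of_title = True
--         else:
--             desc.append(tok)
--     return title, desc
-- ===== SOURCE B (Python) =====
-- def separate_title_from_desc(sequence, delimiter_token):
--     seq = list(sequence)
--     try:
--         i = seq.index(delimiter_token)
--     except ValueError:
--         i = len(seq) - 1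
--     return seq[:i + 1], seq[i + 1:]
-- ===== Notes on version B (the rewrite author's own statement) =====
-- stated objective: simpler
-- what changed: B finds the first delimiter index once (list.index with a not-found fallback) and produces both halves by slicing, instead of A's token-by-token appends steered by a boolean flag.
import Mathlib
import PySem

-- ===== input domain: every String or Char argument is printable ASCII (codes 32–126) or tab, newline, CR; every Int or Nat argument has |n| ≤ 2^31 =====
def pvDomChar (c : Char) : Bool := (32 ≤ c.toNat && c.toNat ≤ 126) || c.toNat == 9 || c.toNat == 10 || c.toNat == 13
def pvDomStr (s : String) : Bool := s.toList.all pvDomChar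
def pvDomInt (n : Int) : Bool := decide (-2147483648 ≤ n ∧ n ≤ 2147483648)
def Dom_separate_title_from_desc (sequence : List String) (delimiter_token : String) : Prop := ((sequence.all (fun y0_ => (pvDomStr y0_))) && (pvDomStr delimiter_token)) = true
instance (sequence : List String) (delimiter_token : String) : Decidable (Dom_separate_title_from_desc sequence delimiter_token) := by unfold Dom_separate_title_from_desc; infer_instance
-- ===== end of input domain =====

-- B computes the split point once (first index of the delimiter, falling back to len-1)
-- and returns the two halves by slicing, instead of A's flag-steered token-by-token appends. Objective: simpler.

-- ===== PORT A =====
-- loop body of A: (title, desc, flag_end_of_title) updated per token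
def sepStepA (delimiter_token : String) (s : List String × List String × Bool) (tok : String) :
    List String × List String × Bool :=
  if !s.2.2 then
    (s.1 ++ [tok], s.2.1, if tok == delimiter_token then true else s.2.2)
  else
    (s.1, s.2.1 ++ [tok], s.2.2)

def separate_title_from_desc (sequence : List String) (delimiter_token : String) : List String × List String :=
  let st := sequence.foldl (sepStepA delimiter_token) ([], [], false)
  (st.1, st.2.1)

-- ===== PORT B =====
def separate_title_from_desc_alt (sequence : List String) (delimiter_token : String) : List String × List String :=
  let i : Int := match PySem.List.index? sequence delimiter_token with
    | some k => (k : Int)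
    | none => (sequence.length : Int) - 1
  (PySem.List.slice sequence none (some (i + 1)), PySem.List.slice sequence (some (i + 1)) none)

-- ===== PRECONDITION & SPEC =====
def Spec_separate_title_from_desc (sequence : List String) (delimiter_token : String) (out : List String × List String) : Prop := out = separate_title_from_desc_alt sequence delimiter_token
instance (sequence : List String) (delimiter_token : String) (out : List String × List String) : Decidable (Spec_separate_title_from_desc sequence delimiter_token out) := by unfold Spec_separate_title_from_desc; infer_instance

-- ===== CLAIM (what is proved, stated in full; the proofs are below) =====
def Claim_equal_separate_title_from_desc : Prop := ∀ (sequence : List String) (delimiter_token : String), Dom_separate_title_from_desc sequence delimiter_token → Spec_separate_title_from_desc sequence delimiter_token (separate_title_from_desc sequence delimiter_token)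

-- ===== LEMMAS AND PROOFS =====

theorem sepStepA_true (dl x : String) (t d : List String) :
    sepStepA dl (t, d, true) x = (t, d ++ [x], true) := by
  simp [sepStepA]

theorem sepStepA_false (dl x : String) (t d : List String) :
    sepStepA dl (t, d, false) x = (t ++ [x], d, x == dl) := by
  simp only [sepStepA, Bool.not_false, if_true]
  congr 2
  rw [Bool.eq_iff_iff]
  simp

-- after the flag is set, everything goes to desc
theorem sep_loop_true (dl : String) (rest : List String) :
    ∀ (t d : List String),
      rest.foldl (sepStepA dl) (t, d, true) = (t, d ++ rest, true) := by
  induction rest with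
  | nil => intro t d; simp
  | cons x xs ih =>
    intro t d
    rw [List.foldl_cons, sepStepA_true, ih]
    simp

-- while the flag is false, the fold splits at the first delimiter
theorem sep_loop_false (dl : String) (rest : List String) :
    ∀ (t d : List String),
      rest.foldl (sepStepA dl) (t, d, false) =
      match PySem.List.index? rest dl with
      | some k => (t ++ rest.take (k + 1), d ++ rest.drop (k + 1), true)
      | none => (t ++ rest, d, false) := by
  induction rest with
  | nil => intro t d; simp [PySem.List.index?]
  | cons x xs ih =>
    intro t d
    by_cases hx : x = dl
    · subst hx
      rw [PySem.List.index?_cons_self x xs, List.foldl_cons, sepStepA_false]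
      simp [sep_loop_true]
    · rw [PySem.List.index?_cons_of_ne xs hx, List.foldl_cons, sepStepA_false]
      have hb : (x == dl) = false := by simp [hx]
      rw [hb, ih (t ++ [x]) d]
      cases h : PySem.List.index? xs dl with
      | none => simp
      | some k => simp

theorem separate_title_from_desc_eq (sequence : List String) (delimiter_token : String) :
    separate_title_from_desc sequence delimiter_token =
      separate_title_from_desc_alt sequence delimiter_token := by
  unfold separate_title_from_desc separate_title_from_desc_alt
  rw [sep_loop_false delimiter_token sequence [] []]
  cases h : PySem.List.index? sequence delimiter_token with
  | none =>
    have hnil : sequence.drop sequence.length = [] := by simp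
    have hlen : ((sequence.length : Int) - 1 + 1) = ((sequence.length : Nat) : Int) := by ring
    simp only [hlen]
    rw [PySem.List.slice_to_natCast, PySem.List.slice_from_natCast]
    simp
  | some k =>
    have hk : ((k : Int) + 1) = (((k + 1 : Nat)) : Int) := by push_cast; ring
    simp only [hk]
    rw [PySem.List.slice_to_natCast, PySem.List.slice_from_natCast]
    simp

-- ===== VERDICT (by name: the statement is the Claim_ definition above) =====
theorem separate_title_from_desc_spec : Claim_equal_separate_title_from_desc := by
  intro sequence delimiter_token _
  exact separate_title_from_desc_eq sequence delimiter_token
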